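-- pv_equiv track=rewrite | github.com/Maher-Reven/HackerRank | Algorithms/Bit Manipulation/Sum vs XOR.py | sumXor
-- ===== SOURCE A (Python) =====
-- import math
--
-- def sumXor(n):
--     c=0
--     while(n):
--         if(n%2==0):
--             c+=1
--         else:
--             c+=0
--         n//=2
--     return int(math.pow(2,c))
-- ===== SOURCE B (Python) =====
-- def sumXor(n):
--     # Multiplicative recursion: each zero bit contributes a factor 2 directly
--     # to the product; no counter, no pow.
--     if n == 0:
--         return 1
--     return (2 - n % 2) * sumXor(n // 2)
-- ===== Notes on version B (the rewrite author's own statement) =====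
-- stated objective: simpler
-- what changed: Replaces A's count-then-exponentiate scheme (accumulate a zero-bit counter in a while loop, then an int(math.pow(...)) call) by a multiplicative recursion that needs no counter and no pow: each halving step folds its factor into the running product, so a zero bit doubles the result directly.
-- outside the precondition, e.g. on sumXor(-1): A does not finish within the time limit, B raises RecursionError
import Mathlib
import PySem

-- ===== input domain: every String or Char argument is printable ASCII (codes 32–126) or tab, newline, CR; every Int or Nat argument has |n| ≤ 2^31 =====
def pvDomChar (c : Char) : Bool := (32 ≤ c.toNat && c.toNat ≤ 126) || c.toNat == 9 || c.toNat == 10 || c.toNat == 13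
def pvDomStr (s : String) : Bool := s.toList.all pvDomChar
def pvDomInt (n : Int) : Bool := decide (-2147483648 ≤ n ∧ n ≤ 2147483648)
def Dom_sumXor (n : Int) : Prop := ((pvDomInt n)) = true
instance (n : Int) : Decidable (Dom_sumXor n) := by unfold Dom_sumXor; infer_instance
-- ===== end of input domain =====

-- B replaces A's count-zero-bits-then-math.pow scheme by a multiplicative recursion
-- (each zero bit multiplies the result by 2 directly); simpler, same cost.

-- ===== PORT A =====
-- A's while-loop: counts even steps while halving; the positivity guard only makes the
-- recursion total (on negative input the Python loop never terminates; Pre_ excludes that).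
def sumXorLoop (n : Int) (c : Nat) : Nat :=
  if h : 0 < n then
    sumXorLoop (PySem.Int.floordiv n 2) (if PySem.Int.mod n 2 = 0 then c + 1 else c + 0)
  else c
termination_by n.toNat
decreasing_by
  simp [PySem.Int.floordiv, Int.fdiv_eq_ediv]
  omega

-- int(math.pow(...)) is an exact power of two for every count reachable in the domain
def sumXor (n : Int) : Int := (2 : Int) ^ (sumXorLoop n 0)

-- ===== PORT B =====
-- Source B's recursion; the positivity guard only makes it total (Python raises
-- RecursionError on negative input; Pre_ excludes that).
def sumXor_alt (n : Int) : Int :=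
  if h : 0 < n then
    (2 - PySem.Int.mod n 2) * sumXor_alt (PySem.Int.floordiv n 2)
  else 1
termination_by n.toNat
decreasing_by
  simp [PySem.Int.floordiv, Int.fdiv_eq_ediv]
  omega

-- ===== PRECONDITION & SPEC =====
-- Pre_ excludes negative n: there A's while-loop never terminates and B overflows
-- the recursion stack, so neither program returns.
def Pre_sumXor (n : Int) : Prop := 0 ≤ n
instance (n : Int) : Decidable (Pre_sumXor n) := by unfold Pre_sumXor; infer_instance
def pvWitness_sumXor : Int := 5

def Spec_sumXor (n : Int) (out : Int) : Prop := out = sumXor_alt n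
instance (n : Int) (out : Int) : Decidable (Spec_sumXor n out) := by unfold Spec_sumXor; infer_instance

-- ===== CLAIM (what is proved, stated in full; the proofs are below) =====
def Claim_equal_sumXor : Prop := ∀ (n : Int), Dom_sumXor n → Pre_sumXor n → Spec_sumXor n (sumXor n)

-- ===== LEMMAS AND PROOFS =====

-- the zero-bit count of m (below its bit length)
def pvZc (m : Nat) : Nat :=
  if m = 0 then 0 else pvZc (m / 2) + (1 - m % 2)

lemma sumXorLoop_eq (m : Nat) (c : Nat) :
    sumXorLoop (m : Int) c = c + pvZc m := by
  induction m using Nat.strong_induction_on generalizing c with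
  | _ m ih =>
    rw [sumXorLoop]
    unfold pvZc
    by_cases h : m = 0
    · simp [h]
    · have hpos : (0 : Int) < (m : Int) := by exact_mod_cast Nat.pos_of_ne_zero h
      have hfd : PySem.Int.floordiv (m : Int) 2 = ((m / 2 : Nat) : Int) := by
        simp [PySem.Int.floordiv, Int.fdiv_eq_ediv]
      have hmod : PySem.Int.mod (m : Int) 2 = ((m % 2 : Nat) : Int) := by
        simp [PySem.Int.mod, Int.fmod_eq_emod]
      have hlt : m / 2 < m := Nat.div_lt_self (Nat.pos_of_ne_zero h) (by norm_num)
      rw [dif_pos hpos, hfd, hmod, ih (m / 2) hlt]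
      rcases Nat.mod_two_eq_zero_or_one m with he | he
      · simp [h, he]; omega
      · simp [h, he]

lemma sumXor_alt_eq (m : Nat) : sumXor_alt (m : Int) = (2 : Int) ^ (pvZc m) := by
  induction m using Nat.strong_induction_on with
  | _ m ih =>
    rw [sumXor_alt]
    unfold pvZc
    by_cases h : m = 0
    · simp [h]
    · have hpos : (0 : Int) < (m : Int) := by exact_mod_cast Nat.pos_of_ne_zero h
      have hfd : PySem.Int.floordiv (m : Int) 2 = ((m / 2 : Nat) : Int) := by
        simp [PySem.Int.floordiv, Int.fdiv_eq_ediv]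
      have hmod : PySem.Int.mod (m : Int) 2 = ((m % 2 : Nat) : Int) := by
        simp [PySem.Int.mod, Int.fmod_eq_emod]
      have hlt : m / 2 < m := Nat.div_lt_self (Nat.pos_of_ne_zero h) (by norm_num)
      rw [dif_pos hpos, hfd, hmod, ih (m / 2) hlt]
      rcases Nat.mod_two_eq_zero_or_one m with he | he
      · simp [h, he, pow_succ]; ring
      · simp [h, he]

-- ===== VERDICT (by name: the statement is the Claim_ definition above) =====
theorem sumXor_spec : Claim_equal_sumXor := by
  intro n _ hpre
  have hn : n = (n.natAbs : Int) := by
    unfold Pre_sumXor at hpre; omega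
  unfold Spec_sumXor sumXor
  rw [hn, sumXorLoop_eq, sumXor_alt_eq]
  simp
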